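-- pv_equiv track=rewrite | github.com/tambama/UnscrambleComputerScienceProblems | Task4.py | getOutgoingCallersWithoutIncomingCalls
-- ===== SOURCE A (Python) =====
-- def getOutgoingCallersWithoutIncomingCalls(calls):
--     outGoingCallers = []
--     receivers = [row[1] for row in calls]
--     for record in calls:
--         if record[0] in receivers:
--             continue
--         else:
--             if record[0] in outGoingCallers:
--                 continue
--             else:
--                 outGoingCallers.append(record[0])
--
--     return outGoingCallers
-- ===== SOURCE B (Python) =====
-- def getOutgoingCallersWithoutIncomingCalls(calls):
--     # Marking pass: a dict maps each name to True (candidate caller) or False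
--     # (has an incoming call). setdefault keeps the first mark; a receiver
--     # overwrites its mark to False in place. No membership tests anywhere.
--     status = {}
--     for record in calls:
--         status.setdefault(record[0], True)
--         status[record[1]] = False
--     return [name for name, ok in status.items() if ok]
-- ===== Notes on version B (the rewrite author's own statement) =====
-- stated objective: alternative
-- what changed: Replaces A's receiver-list precomputation and fused loop with two list-membership tests and an append by a single marking pass over a status dict (setdefault True for callers, overwrite False for receivers) followed by one scan of the dict items; no membership test remains.
-- outside the precondition, e.g. on getOutgoingCallersWithoutIncomingCalls([['a']]): A raises IndexError, B raises IndexError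
import Mathlib
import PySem

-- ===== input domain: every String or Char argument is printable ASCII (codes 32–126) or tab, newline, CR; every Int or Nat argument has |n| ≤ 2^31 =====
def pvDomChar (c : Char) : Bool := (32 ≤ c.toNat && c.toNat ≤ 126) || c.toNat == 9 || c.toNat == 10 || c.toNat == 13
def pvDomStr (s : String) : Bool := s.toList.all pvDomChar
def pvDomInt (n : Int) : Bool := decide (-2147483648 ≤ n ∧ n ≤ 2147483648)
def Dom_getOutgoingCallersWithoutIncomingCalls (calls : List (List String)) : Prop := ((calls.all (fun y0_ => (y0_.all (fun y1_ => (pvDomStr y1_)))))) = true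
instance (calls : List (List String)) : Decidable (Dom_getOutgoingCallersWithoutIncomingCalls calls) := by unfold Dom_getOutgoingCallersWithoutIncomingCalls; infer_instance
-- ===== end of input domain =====

-- B replaces A's receiver list + fused membership/dedup loop by a single marking
-- pass over a status dict (setdefault True for callers, overwrite False for
-- receivers) and one scan of the items; no membership test remains (alternative).

-- row[i] for i = 0,1; exact under Pre_ (every row has length ≥ 2, so pyGet? is some)
def pvRowAt (row : List String) (i : Int) : String := (PySem.List.pyGet? row i).getD ""

-- ===== PORT A =====
def getOutgoingCallersWithoutIncomingCalls (calls : List (List String)) : List String :=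
  let receivers := calls.map (fun row => pvRowAt row 1)
  calls.foldl
    (fun outGoingCallers record =>
      if receivers.contains (pvRowAt record 0) then outGoingCallers
      else if outGoingCallers.contains (pvRowAt record 0) then outGoingCallers
      else outGoingCallers ++ [pvRowAt record 0])
    []

-- ===== PORT B =====
-- the final comprehension '[name for name, ok in status.items() if ok]'
def pvTrueKeys (d : PySem.Dict String Bool) : List String :=
  (d.items.filter (fun p => p.2)).map (fun p => p.1)

def getOutgoingCallersWithoutIncomingCalls_alt (calls : List (List String)) : List String :=
  let status := calls.foldl
    (fun d record =>
      (PySem.Dict.setdefault d (pvRowAt record 0) true).insert (pvRowAt record 1) false)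
    PySem.Dict.empty
  pvTrueKeys status

-- ===== PRECONDITION & SPEC =====
-- Pre_ excludes rows shorter than 2 entries, on which A (and B) raise IndexError at row[1]/row[0].
def Pre_getOutgoingCallersWithoutIncomingCalls (calls : List (List String)) : Prop :=
  ∀ row ∈ calls, 2 ≤ row.length
instance (calls : List (List String)) : Decidable (Pre_getOutgoingCallersWithoutIncomingCalls calls) := by unfold Pre_getOutgoingCallersWithoutIncomingCalls; infer_instance
def pvWitness_getOutgoingCallersWithoutIncomingCalls : List (List String) := [["a", "b"], ["b", "c"]]

def Spec_getOutgoingCallersWithoutIncomingCalls (calls : List (List String)) (out : List String) : Prop := out = getOutgoingCallersWithoutIncomingCalls_alt calls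
instance (calls : List (List String)) (out : List String) : Decidable (Spec_getOutgoingCallersWithoutIncomingCalls calls out) := by unfold Spec_getOutgoingCallersWithoutIncomingCalls; infer_instance

-- ===== CLAIM (what is proved, stated in full; the proofs are below) =====
def Claim_equal_getOutgoingCallersWithoutIncomingCalls : Prop := ∀ (calls : List (List String)), Dom_getOutgoingCallersWithoutIncomingCalls calls → Pre_getOutgoingCallersWithoutIncomingCalls calls → Spec_getOutgoingCallersWithoutIncomingCalls calls (getOutgoingCallersWithoutIncomingCalls calls)

-- ===== LEMMAS AND PROOFS =====

-- A's fused loop, run from an accumulator s.filter (∉ r), lands at the filtered update of s.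
theorem pvFusedLoop (r : List String) (rows : List (List String)) :
    ∀ (s : PySem.Set String), s.Nodup →
    rows.foldl
      (fun out record =>
        if r.contains (pvRowAt record 0) then out
        else if out.contains (pvRowAt record 0) then out
        else out ++ [pvRowAt record 0])
      (s.filter (fun c => !r.contains c))
    = (PySem.Set.update s (rows.map (fun row => pvRowAt row 0))).filter (fun c => !r.contains c) := by
  induction rows with
  | nil => intro s _; simp [PySem.Set.update]
  | cons rec rest ih =>
    intro s hs
    simp only [List.foldl_cons, List.map_cons, PySem.Set.update_cons]
    set c := pvRowAt rec 0 with hc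
    by_cases hr : r.contains c = true
    · rw [hr]
      simp only [if_true]
      have hfe : (PySem.Set.add s c).filter (fun x => !r.contains x) = s.filter (fun x => !r.contains x) := by
        rw [PySem.Set.add_eq_ite]
        split_ifs with hm
        · rfl
        · have hcr : c ∈ r := by simpa using hr
          simp [List.filter_append, hcr]
      rw [← hfe, ih _ (PySem.Set.nodup_add s c hs)]
    · rw [Bool.not_eq_true] at hr
      rw [hr]
      have hnr : c ∉ r := by simpa using hr
      simp only [Bool.false_eq_true, if_false]
      by_cases hm : c ∈ s
      · have hmem : (s.filter (fun x => !r.contains x)).contains c = true := by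
          simp [List.mem_filter, hm, hnr]
        rw [hmem]
        simp only [if_true]
        rw [PySem.Set.add_of_mem hm]
        exact ih s hs
      · have hmem : (s.filter (fun x => !r.contains x)).contains c = false := by
          simp only [List.contains_eq_mem, decide_eq_false_iff_not, List.mem_filter]
          intro h; exact hm h.1
        rw [hmem]
        simp only [Bool.false_eq_true, if_false]
        rw [PySem.Set.add_of_not_mem hm]
        have : s.filter (fun x => !r.contains x) ++ [c]
            = (s ++ [c]).filter (fun x => !r.contains x) := by
          simp [List.filter_append, hnr]
        rw [this, ih _ ?_]
        exact List.Nodup.append hs (List.nodup_singleton c) (by simpa using hm)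

-- marking a key False removes it from the true-keys list (any items list, no nodup needed)
theorem pvTrueKeys_mark (r : String) (l : List (String × Bool)) :
    (((l.map (fun p => if p.1 == r then (r, false) else p)).filter (fun p => p.2)).map (fun p => p.1))
      = ((l.filter (fun p => p.2)).map (fun p => p.1)).filter (fun x => x ≠ r) := by
  induction l with
  | nil => simp
  | cons p rest ih =>
    by_cases hk : p.1 = r <;> by_cases hv : p.2 = true <;>
      simp [hk, hv] <;> simpa using ih

-- inserting False at key r: true keys lose r
theorem pvTrueKeys_insert_false (d : PySem.Dict String Bool) (r : String) :
    pvTrueKeys (d.insert r false) = (pvTrueKeys d).filter (fun x => x ≠ r) := by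
  unfold pvTrueKeys
  by_cases hc : d.contains r = true
  · rw [PySem.Dict.items_insert_of_contains _ _ hc]
    exact pvTrueKeys_mark r d.items
  · rw [PySem.Dict.items_insert_of_not_contains _ _ (by simpa using hc)]
    have hr : r ∉ d.keys := by
      intro h; exact absurd ((PySem.Dict.contains_iff_mem_keys d r).2 h) (by simp [hc])
    rw [List.filter_append, List.map_append]
    simp only [List.filter_cons, List.filter_nil]
    norm_num
    refine (List.filter_eq_self.2 ?_).symm
    intro x hx
    have hxk : x ∈ d.keys := by
      rcases List.mem_map.1 hx with ⟨p, hp, rfl⟩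
      exact List.mem_map_of_mem (List.mem_of_mem_filter hp)
    simp only [Bool.not_eq_eq_eq_not, Bool.not_true, decide_eq_false_iff_not]
    intro h; exact hr (h ▸ hxk)

-- setdefault True at key c: true keys gain c when c is fresh
theorem pvTrueKeys_setdefault (d : PySem.Dict String Bool) (c : String) :
    pvTrueKeys (d.setdefault c true)
      = if d.contains c then pvTrueKeys d else pvTrueKeys d ++ [c] := by
  by_cases hc : d.contains c = true
  · rw [PySem.Dict.setdefault_of_contains _ _ hc, hc]; simp
  · rw [PySem.Dict.setdefault_of_not_contains _ _ (by simpa using hc)]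
    simp only [hc]
    unfold pvTrueKeys
    rw [PySem.Dict.items_insert_of_not_contains _ _ (by simpa using hc)]
    simp [List.filter_append]

-- composing the two filters of the step into one membership filter
theorem pvFilterStep (rs : List String) (r : String) (l : List String) :
    (l.filter (fun c => !rs.contains c)).filter (fun x => x ≠ r)
      = l.filter (fun c => !((rs ++ [r]).contains c)) := by
  rw [List.filter_filter]
  apply List.filter_congr
  intro x _
  by_cases hx : x = r
  · subst hx; simp
  · cases hr : rs.contains x <;>
      simp [hx] <;> simpa using hr

-- B's marking loop computes the filtered dedup, by induction with a general starting dict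
theorem pvMarkLoop (rows : List (List String)) :
    ∀ (d : PySem.Dict String Bool) (cs rs : List String),
      pvTrueKeys d = (PySem.List.dedup cs).filter (fun c => !rs.contains c) →
      (∀ k, d.contains k = (cs.contains k || rs.contains k)) →
      pvTrueKeys (rows.foldl
        (fun d record =>
          (PySem.Dict.setdefault d (pvRowAt record 0) true).insert (pvRowAt record 1) false)
        d)
      = (PySem.List.dedup (cs ++ rows.map (fun row => pvRowAt row 0))).filter
          (fun c => !((rs ++ rows.map (fun row => pvRowAt row 1)).contains c)) := by
  induction rows with
  | nil => intro d cs rs h1 _; simpa using h1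
  | cons rec rest ih =>
    intro d cs rs h1 h2
    simp only [List.foldl_cons, List.map_cons]
    set c := pvRowAt rec 0 with hc
    set r := pvRowAt rec 1 with hr
    have hstep := ih ((PySem.Dict.setdefault d c true).insert r false) (cs ++ [c]) (rs ++ [r]) ?_ ?_
    · rw [hstep]
      congr 1
      · simp
      · simp
    · -- true-keys premise for the stepped dict
      rw [pvTrueKeys_insert_false, pvTrueKeys_setdefault, h2 c]
      by_cases hcs : c ∈ cs
      · have hb : cs.contains c = true := by simpa using hcs
        rw [hb]
        simp only [Bool.true_or, if_true]
        rw [h1, pvFilterStep]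
        have hd : PySem.List.dedup (cs ++ [c]) = PySem.List.dedup cs := by
          simp only [PySem.List.dedup_eq_ofList, PySem.Set.ofList_append_singleton]
          exact PySem.Set.add_of_mem ((PySem.Set.mem_ofList _ _).2 hcs)
        rw [hd]
      · have hb : cs.contains c = false := by simpa using hcs
        rw [hb]
        simp only [Bool.false_or]
        have hd : PySem.List.dedup (cs ++ [c]) = PySem.List.dedup cs ++ [c] := by
          simp only [PySem.List.dedup_eq_ofList, PySem.Set.ofList_append_singleton]
          exact PySem.Set.add_of_not_mem (fun h => hcs ((PySem.Set.mem_ofList _ _).1 h))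
        rw [hd, List.filter_append]
        by_cases hcr : c ∈ rs
        · have hbr : rs.contains c = true := by simpa using hcr
          rw [hbr]
          simp only [if_true]
          rw [h1, pvFilterStep]
          have h0 : [c].filter (fun x => !((rs ++ [r]).contains x)) = [] := by
            simp [hcr]
          rw [h0, List.append_nil]
        · have hbr : rs.contains c = false := by simpa using hcr
          rw [hbr]
          simp only [Bool.false_eq_true, if_false]
          rw [List.filter_append, h1, pvFilterStep]
          congr 1
          by_cases hrc : c = r <;> simp [hrc, hcr]
    · -- contains premise for the stepped dict
      intro k
      rw [PySem.Dict.contains_insert, PySem.Dict.contains_setdefault, h2 k]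
      simp only [List.contains_append, List.contains_cons, List.contains_nil, Bool.or_false]
      cases k == r <;> cases k == c <;> cases cs.contains k <;> cases rs.contains k <;> rfl

-- ===== VERDICT (by name: the statement is the Claim_ definition above) =====
theorem getOutgoingCallersWithoutIncomingCalls_spec : Claim_equal_getOutgoingCallersWithoutIncomingCalls := by
  intro calls _ _
  unfold Spec_getOutgoingCallersWithoutIncomingCalls
  unfold getOutgoingCallersWithoutIncomingCalls getOutgoingCallersWithoutIncomingCalls_alt
  simp only []
  have hA := pvFusedLoop (calls.map (fun row => pvRowAt row 1)) calls [] List.nodup_nil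
  simp only [List.filter_nil] at hA
  rw [hA, PySem.Set.update_nil_left]
  have hB := pvMarkLoop calls PySem.Dict.empty [] [] rfl (by intro k; simp)
  simp only [List.nil_append] at hB
  rw [hB, PySem.List.dedup_eq_ofList]
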